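-- pv_equiv track=rewrite | github.com/Nillipilli/Sudoku_Game | tk_sudoku.py | get_difficulty_level
-- ===== SOURCE A (Python) =====
-- def get_difficulty_level(unsolved_sudoku_as_one_list) -> str:
--     """Get the difficulty level by checking how many cells are empty."""
--     filled_cells = 0
--     for value in unsolved_sudoku_as_one_list:
--         if value is not None:
--             filled_cells += 1
--
--     difficulty_level = ""
--     if filled_cells <= 30:
--         difficulty_level = "Very Hard"
--     elif filled_cells <= 35:
--         difficulty_level = "Hard"
--     elif filled_cells <= 40:
--         difficulty_level = "Medium"
--     elif filled_cells <= 45: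
--         difficulty_level = "Easy"
--     else:
--         difficulty_level = "Very Easy"
--
--     return difficulty_level
-- ===== SOURCE B (Python) =====
-- def _bisect_left(thresholds, x):
--     lo, hi = 0, len(thresholds)
--     while lo < hi:
--         mid = (lo + hi) // 2
--         if thresholds[mid] < x:
--             lo = mid + 1
--         else:
--             hi = mid
--     return lo
--
--
-- def get_difficulty_level(unsolved_sudoku_as_one_list) -> str:
--     """Get the difficulty level by checking how many cells are empty."""
--     filled_cells = sum(1 for value in unsolved_sudoku_as_one_list if value is not None)
--     thresholds = [30, 35, 40, 45]
--     labels = ["Very Hard", "Hard", "Medium", "Easy", "Very Easy"]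
--     return labels[_bisect_left(thresholds, filled_cells)]
-- ===== Notes on version B (the rewrite author's own statement) =====
-- stated objective: alternative
-- what changed: Replaces the if/elif cascade with a parallel threshold/label table indexed by a hand-rolled bisect_left binary search, and counts filled cells with a generator sum instead of an explicit accumulator loop.
import Mathlib
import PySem

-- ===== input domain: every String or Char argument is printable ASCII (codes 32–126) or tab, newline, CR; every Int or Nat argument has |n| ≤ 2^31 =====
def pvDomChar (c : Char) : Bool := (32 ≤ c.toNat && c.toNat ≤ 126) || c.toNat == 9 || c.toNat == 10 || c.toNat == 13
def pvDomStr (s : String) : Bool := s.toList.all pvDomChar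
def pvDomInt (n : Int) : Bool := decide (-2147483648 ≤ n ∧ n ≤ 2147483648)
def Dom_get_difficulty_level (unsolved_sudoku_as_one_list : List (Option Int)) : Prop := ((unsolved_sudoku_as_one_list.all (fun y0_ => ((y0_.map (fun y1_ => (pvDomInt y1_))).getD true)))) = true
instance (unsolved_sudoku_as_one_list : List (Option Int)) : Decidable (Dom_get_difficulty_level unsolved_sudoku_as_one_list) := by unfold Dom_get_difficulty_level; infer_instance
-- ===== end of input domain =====

-- B replaces A's if/elif cascade by a threshold/label table indexed via a hand-rolled
-- binary search (bisect_left); same O(n) cost, different decision structure.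


-- ===== PORT A =====
def get_difficulty_level (unsolved_sudoku_as_one_list : List (Option Int)) : String :=
  let filled_cells : Int :=
    unsolved_sudoku_as_one_list.foldl (fun acc value => if value ≠ none then acc + 1 else acc) 0
  if filled_cells ≤ 30 then "Very Hard"
  else if filled_cells ≤ 35 then "Hard"
  else if filled_cells ≤ 40 then "Medium"
  else if filled_cells ≤ 45 then "Easy"
  else "Very Easy"

-- ===== PORT B =====
-- while lo < hi loop of _bisect_left, as recursion on hi - lo
def pvBisectLeft (thresholds : List Int) (x : Int) (lo hi : Nat) : Nat :=
  if h : lo < hi then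
    let mid := (lo + hi) / 2
    if thresholds.getD mid 0 < x then pvBisectLeft thresholds x (mid + 1) hi
    else pvBisectLeft thresholds x lo mid
  else lo
termination_by hi - lo
decreasing_by all_goals omega

def get_difficulty_level_alt (unsolved_sudoku_as_one_list : List (Option Int)) : String :=
  let filled_cells : Int :=
    unsolved_sudoku_as_one_list.foldl (fun acc value => if value ≠ none then acc + 1 else acc) 0
  let thresholds : List Int := [30, 35, 40, 45]
  let labels : List String := ["Very Hard", "Hard", "Medium", "Easy", "Very Easy"]
  labels.getD (pvBisectLeft thresholds filled_cells 0 thresholds.length) ""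

-- ===== PRECONDITION & SPEC =====
def Spec_get_difficulty_level (unsolved_sudoku_as_one_list : List (Option Int)) (out : String) : Prop := out = get_difficulty_level_alt unsolved_sudoku_as_one_list
instance (unsolved_sudoku_as_one_list : List (Option Int)) (out : String) : Decidable (Spec_get_difficulty_level unsolved_sudoku_as_one_list out) := by unfold Spec_get_difficulty_level; infer_instance

-- ===== CLAIM (what is proved, stated in full; the proofs are below) =====
def Claim_equal_get_difficulty_level : Prop := ∀ (unsolved_sudoku_as_one_list : List (Option Int)), Dom_get_difficulty_level unsolved_sudoku_as_one_list → Spec_get_difficulty_level unsolved_sudoku_as_one_list (get_difficulty_level unsolved_sudoku_as_one_list)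

-- ===== LEMMAS AND PROOFS =====
-- The two ports compute the same filled-cell count term; it remains to match the
-- if-chain against the table lookup for an arbitrary count n.
theorem pv_label_eq (n : Int) :
    (if n ≤ 30 then "Very Hard"
     else if n ≤ 35 then "Hard"
     else if n ≤ 40 then "Medium"
     else if n ≤ 45 then "Easy"
     else "Very Easy")
    = (["Very Hard", "Hard", "Medium", "Easy", "Very Easy"].getD
        (pvBisectLeft [30, 35, 40, 45] n 0 4) "") := by
  by_cases h40 : (40:Int) < n <;> by_cases h35 : (35:Int) < n <;>
    by_cases h45 : (45:Int) < n <;> by_cases h30 : (30:Int) < n <;>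
    repeat (first | omega | rfl | (rw [pvBisectLeft]; simp_all [List.getD]))
  all_goals (split_ifs <;> simp_all <;> omega)

-- ===== VERDICT (by name: the statement is the Claim_ definition above) =====
theorem get_difficulty_level_spec : Claim_equal_get_difficulty_level := by
  intro xs _
  unfold Spec_get_difficulty_level get_difficulty_level get_difficulty_level_alt
  exact pv_label_eq _
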